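-- pv_equiv track=rewrite | github.com/marco-willi/camera-trap-data-pipeline | zooniverse_exports/extractor.py | find_question_answer_pairs
-- ===== SOURCE A (Python) =====
-- from collections import defaultdict, Counter
--
-- def find_question_answer_pairs(all_records):
--     """ Analyze annotations to determine question and answer mappings
--         Output:
--          {'species': ['vulture', 'zebra', 'nyala', ...],
--           'young_present': ['yes', 'no'],
--           }
--     """
--     pairs = defaultdict(Counter)
--     for record in all_records:
--         annos = record['annos']
--         for anno in annos:
--             for question, answers in anno.items():
--                 if isinstance(answers, list):
--                     pairs[question].update(answers)
--                 else:
--                     pairs[question].update({answers})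
--     return {k: list(v.keys()) for k, v in pairs.items()}
-- ===== SOURCE B (Python) =====
-- def find_question_answer_pairs(all_records):
--     # Accumulate first, deduplicate last: flatten every seen question and every
--     # (question, answer) pair into flat lists in one traversal, then build the
--     # result in a separate pass with dict.fromkeys (first-occurrence order),
--     # instead of maintaining per-question Counters while traversing.
--     seen_questions = []
--     flat = []
--     for record in all_records:
--         for anno in record['annos']:
--             for question, answers in anno.items():
--                 seen_questions.append(question)
--                 if isinstance(answers, list):
--                     flat.extend((question, a) for a in answers)
--                 else:
--                     flat.append((question, answers))
--     return {q: list(dict.fromkeys(a for q2, a in flat if q2 == q))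
--             for q in dict.fromkeys(seen_questions)}
-- ===== Notes on version B (the rewrite author's own statement) =====
-- stated objective: simpler
-- what changed: B accumulates all seen questions and flattened (question, answer) pairs in one plain traversal and builds the result in a separate final pass that groups per question and deduplicates with dict.fromkeys (first-occurrence order), instead of A's defaultdict of Counters maintained incrementally during the traversal.
import Mathlib
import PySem

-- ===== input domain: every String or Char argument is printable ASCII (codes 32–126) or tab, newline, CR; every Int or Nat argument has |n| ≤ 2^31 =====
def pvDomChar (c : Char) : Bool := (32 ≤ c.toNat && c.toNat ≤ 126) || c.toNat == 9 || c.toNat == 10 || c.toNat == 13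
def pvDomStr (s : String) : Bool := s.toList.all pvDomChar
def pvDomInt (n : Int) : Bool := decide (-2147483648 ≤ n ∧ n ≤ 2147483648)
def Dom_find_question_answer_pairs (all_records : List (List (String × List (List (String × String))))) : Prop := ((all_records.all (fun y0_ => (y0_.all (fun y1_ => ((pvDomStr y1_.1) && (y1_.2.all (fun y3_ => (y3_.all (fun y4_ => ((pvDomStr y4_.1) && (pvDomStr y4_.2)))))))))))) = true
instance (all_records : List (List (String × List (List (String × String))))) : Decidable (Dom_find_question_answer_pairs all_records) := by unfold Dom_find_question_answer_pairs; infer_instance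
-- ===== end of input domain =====

-- B separates accumulation from deduplication (flatten all question/answer pairs, then one
-- grouping pass with first-occurrence dedup) where A maintains a defaultdict of Counters;
-- objective: simpler. Under the type convention answers are single strings, so A's
-- isinstance-list branch (and B's extend branch) is not reachable and is not ported.

-- ===== PORT A =====
def find_question_answer_pairs (all_records : List (List (String × List (List (String × String))))) : List (String × List String) :=
  -- pairs = defaultdict(Counter); nested loops updating pairs[question] with {answers}
  let pairs : PySem.Dict String (PySem.Dict String Int) :=
    all_records.foldl (fun pairs record =>
      (((PySem.Dict.ofList record).getD "annos" []).foldl (fun pairs anno =>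
        ((PySem.Dict.ofList anno).items.foldl (fun pairs qa =>
          pairs.modify qa.1 PySem.Dict.empty (fun c => c.modify qa.2 0 (· + 1))) pairs)) pairs)) PySem.Dict.empty
  -- {k: list(v.keys()) for k, v in pairs.items()}
  pairs.items.map (fun kv => (kv.1, kv.2.keys))

-- ===== PORT B =====
def find_question_answer_pairs_alt (all_records : List (List (String × List (List (String × String))))) : List (String × List String) :=
  -- one traversal appending to flat lists (seen_questions, flat)
  let st : List String × List (String × String) :=
    all_records.foldl (fun st record =>
      (((PySem.Dict.ofList record).getD "annos" []).foldl (fun st anno =>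
        ((PySem.Dict.ofList anno).items.foldl (fun st qa =>
          (st.1 ++ [qa.1], st.2 ++ [(qa.1, qa.2)])) st)) st)) ([], [])
  -- {q: list(dict.fromkeys(a for q2, a in flat if q2 == q)) for q in dict.fromkeys(seen_questions)}
  (PySem.Set.ofList st.1).map (fun q =>
    (q, PySem.Set.ofList ((st.2.filter (fun p => p.1 == q)).map Prod.snd)))

-- ===== PRECONDITION & SPEC =====
-- Pre_ excludes exactly the inputs where some record has no 'annos' key: there Python A
-- raises KeyError (the ports use the dict's getD with default []).
def Pre_find_question_answer_pairs (all_records : List (List (String × List (List (String × String))))) : Prop :=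
  ∀ record ∈ all_records, "annos" ∈ record.map Prod.fst
instance (all_records : List (List (String × List (List (String × String))))) : Decidable (Pre_find_question_answer_pairs all_records) := by unfold Pre_find_question_answer_pairs; infer_instance

def pvWitness_find_question_answer_pairs : (List (List (String × List (List (String × String))))) :=
  [[("annos", [[("species", "zebra"), ("young_present", "yes")], [("species", "zebra")]])],
   [("annos", [[("species", "nyala")]])]]

def Spec_find_question_answer_pairs (all_records : List (List (String × List (List (String × String))))) (out : List (String × List String)) : Prop := out = find_question_answer_pairs_alt all_records
instance (all_records : List (List (String × List (List (String × String))))) (out : List (String × List String)) : Decidable (Spec_find_question_answer_pairs all_records out) := by unfold Spec_find_question_answer_pairs; infer_instance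

-- ===== CLAIM (what is proved, stated in full; the proofs are below) =====
def Claim_equal_find_question_answer_pairs : Prop := ∀ (all_records : List (List (String × List (List (String × String))))), Dom_find_question_answer_pairs all_records → Pre_find_question_answer_pairs all_records → Spec_find_question_answer_pairs all_records (find_question_answer_pairs all_records)

-- ===== LEMMAS AND PROOFS =====

-- A's per-pair step: pairs[question].update({answer})
def pvStepA (pairs : PySem.Dict String (PySem.Dict String Int)) (qa : String × String) : PySem.Dict String (PySem.Dict String Int) :=
  pairs.modify qa.1 PySem.Dict.empty (fun c => c.modify qa.2 0 (· + 1))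

-- the flattened (question, answer) pairs of the whole input, as a proof-side notion
def pvFlat (all_records : List (List (String × List (List (String × String))))) : List (String × String) :=
  all_records.flatMap (fun record =>
    ((PySem.Dict.ofList record).getD "annos" []).flatMap (fun anno => (PySem.Dict.ofList anno).items))

theorem annos_foldA (annos : List (List (String × String))) (d : PySem.Dict String (PySem.Dict String Int)) :
    annos.foldl (fun pairs anno => ((PySem.Dict.ofList anno).items.foldl pvStepA pairs)) d
      = (annos.flatMap (fun anno => (PySem.Dict.ofList anno).items)).foldl pvStepA d := by
  induction annos generalizing d with
  | nil => rfl
  | cons a t ih => rw [List.foldl_cons, ih]; simp [List.foldl_append]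

theorem foldA_eq_flat (rs : List (List (String × List (List (String × String))))) (d : PySem.Dict String (PySem.Dict String Int)) :
    rs.foldl (fun pairs record =>
      (((PySem.Dict.ofList record).getD "annos" []).foldl (fun pairs anno =>
        ((PySem.Dict.ofList anno).items.foldl pvStepA pairs)) pairs)) d
      = (pvFlat rs).foldl pvStepA d := by
  induction rs generalizing d with
  | nil => rfl
  | cons r t ih => rw [List.foldl_cons, ih, annos_foldA]; simp [pvFlat, List.foldl_append]

theorem items_foldB (items : List (String × String)) (st : List String × List (String × String)) :
    items.foldl (fun st (qa : String × String) => (st.1 ++ [qa.1], st.2 ++ [(qa.1, qa.2)])) st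
      = (st.1 ++ items.map Prod.fst, st.2 ++ items) := by
  induction items generalizing st with
  | nil => simp
  | cons a t ih => rw [List.foldl_cons, ih]; simp

theorem annos_foldB (annos : List (List (String × String))) (st : List String × List (String × String)) :
    annos.foldl (fun st anno => ((PySem.Dict.ofList anno).items.foldl (fun st (qa : String × String) => (st.1 ++ [qa.1], st.2 ++ [(qa.1, qa.2)])) st)) st
      = (st.1 ++ (annos.flatMap (fun anno => (PySem.Dict.ofList anno).items)).map Prod.fst,
         st.2 ++ annos.flatMap (fun anno => (PySem.Dict.ofList anno).items)) := by
  induction annos generalizing st with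
  | nil => simp
  | cons a t ih => rw [List.foldl_cons, ih, items_foldB]; simp

theorem foldB_eq_flat (rs : List (List (String × List (List (String × String))))) (st : List String × List (String × String)) :
    rs.foldl (fun st record =>
      (((PySem.Dict.ofList record).getD "annos" []).foldl (fun st anno =>
        ((PySem.Dict.ofList anno).items.foldl (fun st (qa : String × String) => (st.1 ++ [qa.1], st.2 ++ [(qa.1, qa.2)])) st)) st)) st
      = (st.1 ++ (pvFlat rs).map Prod.fst, st.2 ++ pvFlat rs) := by
  induction rs generalizing st with
  | nil => simp [pvFlat]
  | cons r t ih => rw [List.foldl_cons, ih, annos_foldB]; simp [pvFlat]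

theorem getD_foldA (L : List (String × String)) (d : PySem.Dict String (PySem.Dict String Int)) (q : String) :
    (L.foldl pvStepA d).getD q PySem.Dict.empty
      = ((L.filter (fun p => p.1 == q)).map Prod.snd).foldl
          (fun c a => c.modify a 0 (· + 1)) (d.getD q PySem.Dict.empty) := by
  induction L generalizing d with
  | nil => rfl
  | cons p t ih =>
    rw [List.foldl_cons, ih]
    by_cases h : p.1 = q
    · simp [pvStepA, h]
    · have h2 : ¬ q = p.1 := fun e => h e.symm
      simp [pvStepA, PySem.Dict.getD_modify, h, h2]

theorem keys_foldA (L : List (String × String)) :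
    (L.foldl pvStepA PySem.Dict.empty).keys = PySem.Set.ofList (L.map Prod.fst) := by
  have h := PySem.Dict.keys_foldl_modify_key (l := L) (key := Prod.fst)
    (d0 := (PySem.Dict.empty : PySem.Dict String Int))
    (f := fun _ qa => (fun c => c.modify qa.2 0 (· + 1)))
    (d := (PySem.Dict.empty : PySem.Dict String (PySem.Dict String Int)))
  simpa [pvStepA, PySem.Dict.keys_empty, PySem.Set.update_nil_left] using h

theorem nodup_keys_foldA (L : List (String × String)) :
    (L.foldl pvStepA PySem.Dict.empty).keys.Nodup := by
  have h := PySem.Dict.nodup_keys_foldl_modify_key (l := L) (key := Prod.fst)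
    (d0 := (PySem.Dict.empty : PySem.Dict String Int))
    (f := fun _ qa => (fun c => c.modify qa.2 0 (· + 1)))
    (d := (PySem.Dict.empty : PySem.Dict String (PySem.Dict String Int)))
    (by simp)
  simpa [pvStepA] using h

theorem flat_main (L : List (String × String)) :
    (L.foldl pvStepA PySem.Dict.empty).items.map (fun kv => (kv.1, kv.2.keys))
      = (PySem.Set.ofList (L.map Prod.fst)).map (fun q =>
          (q, PySem.Set.ofList ((L.filter (fun p => p.1 == q)).map Prod.snd))) := by
  rw [PySem.Dict.items_eq_map_keys (L.foldl pvStepA PySem.Dict.empty) (nodup_keys_foldA L) PySem.Dict.empty]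
  rw [List.map_map, keys_foldA]
  apply List.map_congr_left
  intro q hq
  have hg : (L.foldl pvStepA PySem.Dict.empty).getD q PySem.Dict.empty
      = PySem.Dict.counter ((L.filter (fun p => p.1 == q)).map Prod.snd) := by
    rw [getD_foldA, PySem.Dict.getD_empty, PySem.Dict.counter_eq_foldl]
  simp [Function.comp, hg, PySem.Dict.keys_counter]

-- ===== VERDICT (by name: the statement is the Claim_ definition above) =====
theorem find_question_answer_pairs_spec : Claim_equal_find_question_answer_pairs := by
  intro rs _ _
  unfold Spec_find_question_answer_pairs find_question_answer_pairs find_question_answer_pairs_alt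
  rw [show (fun (pairs : PySem.Dict String (PySem.Dict String Int)) (qa : String × String) =>
        pairs.modify qa.1 PySem.Dict.empty (fun c => c.modify qa.2 0 (· + 1))) = pvStepA from rfl]
  rw [foldA_eq_flat, foldB_eq_flat]
  simpa using flat_main (pvFlat rs)
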